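-- pv_equiv track=rewrite | github.com/jfgulden/tp-tda | excercise_1/greedy.py | obtener_ganador
-- ===== SOURCE A (Python) =====
-- def obtener_ganador(monedas):
--     # Turno Sophia: Agarra la moneda más grande
--     # Turno Mateo: Agarra la moneda más chica
--     inicio = 0
--     fin = len(monedas) - 1
--     monedas_sofia = []
--
--     for i in range(len(monedas)): # len(monedas): Turnos totales
--         primera = monedas[inicio]
--         ultima = monedas[fin]
--         if i % 2 == 0:
--             if primera > ultima:
--                 monedas_sofia.append(primera)
--                 inicio += 1
--             else:
--                 monedas_sofia.append(ultima)
--                 fin -= 1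
--         else:
--             if primera >= ultima:
--                 fin -= 1
--             else:
--                 inicio += 1
--
--
--     return sum(monedas_sofia)
-- ===== SOURCE B (Python) =====
-- def obtener_ganador(monedas):
--     # Works on shrinking list values via slicing: no index arithmetic, no
--     # turn counter, no collected list -- one round (Sophia then Mateo) per pass.
--     total = 0
--     while monedas:
--         # Sophia takes the larger end (tie -> last)
--         if monedas[0] > monedas[-1]:
--             total += monedas[0]
--             monedas = monedas[1:]
--         else:
--             total += monedas[-1]
--             monedas = monedas[:-1]
--         # Mateo discards the smaller end (tie -> last), if coins remain
--         if monedas: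
--             if monedas[0] >= monedas[-1]:
--                 monedas = monedas[:-1]
--             else:
--                 monedas = monedas[1:]
--     return total
-- ===== Notes on version B (the rewrite author's own statement) =====
-- stated objective: alternative
-- what changed: Replaces A's index-based simulation (two integer cursors into a fixed list, a global turn counter with an i % 2 parity branch, and a collected list of Sophia's coins summed at the end) by a loop over shrinking list values: each pass performs one full round (Sophia then Mateo) by slicing an end off the remaining list and adding Sophia's pick to a running total; B trades A's O(n) pointer walk for O(n^2) slicing in exchange for an index-free, counter-free formulation.
import Mathlib
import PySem

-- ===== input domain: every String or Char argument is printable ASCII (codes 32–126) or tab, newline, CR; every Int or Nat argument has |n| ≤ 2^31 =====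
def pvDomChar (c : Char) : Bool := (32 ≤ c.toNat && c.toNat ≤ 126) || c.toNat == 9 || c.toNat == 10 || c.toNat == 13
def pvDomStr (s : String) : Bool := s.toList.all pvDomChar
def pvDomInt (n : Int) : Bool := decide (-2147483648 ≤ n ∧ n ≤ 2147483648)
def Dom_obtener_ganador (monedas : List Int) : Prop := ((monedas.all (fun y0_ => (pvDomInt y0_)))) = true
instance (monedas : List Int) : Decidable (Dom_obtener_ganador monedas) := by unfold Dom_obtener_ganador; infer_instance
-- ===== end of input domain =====

-- B replaces A's indexed turn-counter loop (two integer cursors, i % 2 parity branch,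
-- a collected list that is summed) by a loop over shrinking list VALUES: each pass does
-- one full round (Sophia then Mateo) by slicing off an end, with a running total;
-- alternative decomposition (B's slicing is O(n^2) vs A's O(n) pointer walk).


-- ===== PORT A =====
-- A's loop body; state = (inicio, fin, monedas_sofia). Indices inicio/fin are always
-- in range inside A's loop, so the `.getD 0` default of the exact pyGet? is never used.
def aStep (monedas : List Int) (s : Int × Int × List Int) (i : Nat) : Int × Int × List Int :=
  let inicio := s.1
  let fin := s.2.1
  let sofia := s.2.2
  let primera := (PySem.List.pyGet? monedas inicio).getD 0
  let ultima := (PySem.List.pyGet? monedas fin).getD 0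
  if i % 2 = 0 then
    if primera > ultima then (inicio + 1, fin, sofia ++ [primera])
    else (inicio, fin - 1, sofia ++ [ultima])
  else
    if primera ≥ ultima then (inicio, fin - 1, sofia)
    else (inicio + 1, fin, sofia)

def obtener_ganador (monedas : List Int) : Int :=
  let st := (List.range monedas.length).foldl (aStep monedas)
    (0, (monedas.length : Int) - 1, ([] : List Int))
  st.2.2.sum

-- ===== PORT B =====
-- Source B's while loop: tail recursion on the shrinking list value (one round per call),
-- slices ported with PySem.List.slice; terminates because each pass drops an element.
def bLoop (monedas : List Int) (total : Int) : Int :=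
  if h : monedas.isEmpty then total
  else
    -- Sophia takes the larger end (tie -> last)
    let s :=
      if (PySem.List.pyGet? monedas 0).getD 0 > (PySem.List.pyGet? monedas (-1)).getD 0
      then (total + (PySem.List.pyGet? monedas 0).getD 0, PySem.List.slice monedas (some 1) none)
      else (total + (PySem.List.pyGet? monedas (-1)).getD 0, PySem.List.slice monedas none (some (-1)))
    -- Mateo discards the smaller end (tie -> last), if coins remain
    let rest :=
      if s.2.isEmpty then s.2
      else if (PySem.List.pyGet? s.2 0).getD 0 ≥ (PySem.List.pyGet? s.2 (-1)).getD 0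
           then PySem.List.slice s.2 none (some (-1))
           else PySem.List.slice s.2 (some 1) none
    bLoop rest s.1
termination_by monedas.length
decreasing_by
  have hne : monedas ≠ [] := by simpa using h
  have hpos : 0 < monedas.length := List.length_pos_iff.mpr hne
  simp only [PySem.List.slice_from_one, PySem.List.slice_to_neg_one]
  repeat' split
  all_goals simp only [List.length_tail, List.length_dropLast]; omega

def obtener_ganador_alt (monedas : List Int) : Int := bLoop monedas 0

-- ===== PRECONDITION & SPEC =====
def Spec_obtener_ganador (monedas : List Int) (out : Int) : Prop := out = obtener_ganador_alt monedas
instance (monedas : List Int) (out : Int) : Decidable (Spec_obtener_ganador monedas out) := by unfold Spec_obtener_ganador; infer_instance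

-- ===== CLAIM (what is proved, stated in full; the proofs are below) =====
def Claim_equal_obtener_ganador : Prop := ∀ (monedas : List Int), Dom_obtener_ganador monedas → Spec_obtener_ganador monedas (obtener_ganador monedas)

-- ===== LEMMAS AND PROOFS =====


lemma seg_head (monedas : List Int) (inicio k : Nat) (hk : 0 < k) :
    PySem.List.pyGet? ((monedas.drop inicio).take k) 0
      = PySem.List.pyGet? monedas (inicio : Int) := by
  rw [PySem.List.pyGet?_zero, PySem.List.pyGet?_natCast]
  rw [List.getElem?_take_of_lt hk, List.getElem?_drop]
  simp

lemma seg_last (monedas : List Int) (inicio k : Nat) (hk : 0 < k)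
    (h : inicio + k ≤ monedas.length) :
    PySem.List.pyGet? ((monedas.drop inicio).take k) (-1)
      = PySem.List.pyGet? monedas ((inicio : Int) + (k : Int) - 1) := by
  have hcast : (inicio : Int) + (k : Int) - 1 = ((inicio + k - 1 : Nat) : Int) := by omega
  have hlen : ((monedas.drop inicio).take k).length = k := by
    simp [List.length_take, List.length_drop]; omega
  rw [PySem.List.pyGet?_neg_one, hcast, PySem.List.pyGet?_natCast]
  rw [List.getLast?_eq_getElem?, hlen]
  rw [List.getElem?_take_of_lt (by omega), List.getElem?_drop]
  congr 1; omega

lemma seg_tail (monedas : List Int) (inicio k : Nat) :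
    ((monedas.drop inicio).take (k+1)).tail = (monedas.drop (inicio+1)).take k := by
  have h2 : ((monedas.drop inicio).take (k+1)).tail = (monedas.drop inicio).tail.take k := by
    cases h : monedas.drop inicio <;> simp
  rw [h2, List.tail_drop]

lemma seg_dropLast (monedas : List Int) (inicio k : Nat)
    (h : inicio + (k+1) ≤ monedas.length) :
    ((monedas.drop inicio).take (k+1)).dropLast = (monedas.drop inicio).take k := by
  have hlen : ((monedas.drop inicio).take (k+1)).length = k+1 := by
    simp [List.length_take, List.length_drop]; omega
  rw [List.dropLast_eq_take, hlen, List.take_take]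
  simp

lemma seg_ne_empty (monedas : List Int) (inicio k : Nat) (hk : 0 < k)
    (h : inicio + k ≤ monedas.length) :
    ((monedas.drop inicio).take k).isEmpty = false := by
  simp [List.isEmpty_eq_false_iff]
  omega

theorem main_invariant (monedas : List Int) :
    ∀ (k i : Nat), i % 2 = 0 → ∀ (inicio : Nat), inicio + k ≤ monedas.length →
      ∀ (sofia : List Int),
      ((List.range' i k).foldl (aStep monedas)
          ((inicio : Int), (inicio : Int) + (k : Int) - 1, sofia)).2.2.sum
        = bLoop ((monedas.drop inicio).take k) sofia.sum := by
  intro k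
  induction k using Nat.strong_induction_on with
  | _ k ih =>
    match k with
    | 0 =>
      intro i hi inicio hb sofia
      rw [bLoop]
      simp
    | 1 =>
      intro i hi inicio hb sofia
      have hin : inicio < monedas.length := by omega
      rw [bLoop]
      rw [dif_neg (by rw [seg_ne_empty monedas inicio 1 (by omega) hb]; simp)]
      simp only [seg_head monedas inicio 1 (by omega),
        seg_last monedas inicio 1 (by omega) hb]
      have e1 : (inicio : Int) + ((1 : Nat) : Int) - 1 = (inicio : Int) := by omega
      rw [e1]
      rw [if_neg (by omega : ¬ ((PySem.List.pyGet? monedas (inicio:Int)).getD 0 > (PySem.List.pyGet? monedas (inicio:Int)).getD 0))]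
      -- Mateo branch: rest of the singleton is empty
      have hdl : ((monedas.drop inicio).take 1).dropLast = (monedas.drop inicio).take 0 :=
        seg_dropLast monedas inicio 0 hb
      simp only [PySem.List.slice_to_neg_one, hdl, List.take_zero, List.isEmpty_nil]
      rw [bLoop]
      simp [aStep, hi]
    | (k + 2) =>
      intro i hi inicio hb sofia
      have hfin : (inicio : Int) + ((k + 2 : Nat) : Int) - 1 = (inicio : Int) + (k : Int) + 1 := by
        push_cast; ring
      rw [hfin]
      have hrange : List.range' i (k + 2) = i :: (i + 1) :: List.range' (i + 2) k := by
        rw [List.range'_succ, List.range'_succ]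
      rw [hrange]
      simp only [List.foldl_cons]
      have hi1 : ¬ ((i + 1) % 2 = 0) := by omega
      have hi2 : (i + 2) % 2 = 0 := by omega
      -- B side: unfold one round of bLoop
      rw [bLoop]
      rw [dif_neg (by rw [seg_ne_empty monedas inicio (k+2) (by omega) hb]; simp)]
      simp only [seg_head monedas inicio (k+2) (by omega),
        seg_last monedas inicio (k+2) (by omega) hb, hfin,
        PySem.List.slice_from_one, PySem.List.slice_to_neg_one]
      -- A side: unfold the two foldl steps
      simp only [aStep, hi, reduceIte]
      by_cases hc : (PySem.List.pyGet? monedas (inicio : Int)).getD 0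
          > (PySem.List.pyGet? monedas ((inicio : Int) + (k : Int) + 1)).getD 0
      · -- Sophia takes primera; remaining coins are positions inicio+1 .. inicio+k+1
        simp only [if_pos hc, if_neg hi1]
        rw [seg_tail monedas inicio (k+1)]
        have hb1 : (inicio + 1) + (k + 1) ≤ monedas.length := by omega
        simp only [seg_ne_empty monedas (inicio+1) (k+1) (by omega) hb1,
          Bool.false_eq_true, if_false]
        have hh' : PySem.List.pyGet? ((monedas.drop (inicio+1)).take (k+1)) 0
            = PySem.List.pyGet? monedas ((inicio : Int) + 1) := by
          rw [seg_head monedas (inicio+1) (k+1) (by omega)]; congr 1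
        have hl' : PySem.List.pyGet? ((monedas.drop (inicio+1)).take (k+1)) (-1)
            = PySem.List.pyGet? monedas ((inicio : Int) + (k : Int) + 1) := by
          rw [seg_last monedas (inicio+1) (k+1) (by omega) hb1]; congr 1; omega
        rw [hh', hl']
        by_cases hm : (PySem.List.pyGet? monedas ((inicio : Int) + 1)).getD 0
            ≥ (PySem.List.pyGet? monedas ((inicio : Int) + (k : Int) + 1)).getD 0
        · -- Mateo: fin -= 1
          simp only [if_pos hm]
          rw [seg_dropLast monedas (inicio+1) k hb1]
          have H := ih k (by omega) (i + 2) hi2 (inicio + 1) (by omega)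
            (sofia ++ [(PySem.List.pyGet? monedas (inicio : Int)).getD 0])
          simp only [List.sum_append, List.sum_cons, List.sum_nil, add_zero] at H
          rw [show ((inicio + 1 : Nat) : Int) = (inicio : Int) + 1 by push_cast; ring] at H
          rw [show (inicio : Int) + 1 + (k : Int) - 1 = (inicio : Int) + (k : Int) + 1 - 1 by ring] at H
          exact H
        · -- Mateo: inicio += 1
          simp only [if_neg hm]
          rw [seg_tail monedas (inicio+1) k]
          have H := ih k (by omega) (i + 2) hi2 (inicio + 2) (by omega)
            (sofia ++ [(PySem.List.pyGet? monedas (inicio : Int)).getD 0])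
          simp only [List.sum_append, List.sum_cons, List.sum_nil, add_zero] at H
          rw [show ((inicio + 2 : Nat) : Int) = (inicio : Int) + 1 + 1 by push_cast; ring] at H
          rw [show (inicio : Int) + 1 + 1 + (k : Int) - 1 = (inicio : Int) + (k : Int) + 1 by ring] at H
          exact H
      · -- Sophia takes ultima; remaining coins are positions inicio .. inicio+k
        simp only [if_neg hc, if_neg hi1]
        rw [seg_dropLast monedas inicio (k+1) hb]
        have hb1 : inicio + (k + 1) ≤ monedas.length := by omega
        simp only [seg_ne_empty monedas inicio (k+1) (by omega) hb1,
          Bool.false_eq_true, if_false]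
        have hl' : PySem.List.pyGet? ((monedas.drop inicio).take (k+1)) (-1)
            = PySem.List.pyGet? monedas ((inicio : Int) + (k : Int) + 1 - 1) := by
          rw [seg_last monedas inicio (k+1) (by omega) hb1]; congr 1
        rw [seg_head monedas inicio (k+1) (by omega), hl']
        by_cases hm : (PySem.List.pyGet? monedas (inicio : Int)).getD 0
            ≥ (PySem.List.pyGet? monedas ((inicio : Int) + (k : Int) + 1 - 1)).getD 0
        · -- Mateo: fin -= 1
          simp only [if_pos hm]
          rw [seg_dropLast monedas inicio k hb1]
          have H := ih k (by omega) (i + 2) hi2 inicio (by omega)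
            (sofia ++ [(PySem.List.pyGet? monedas ((inicio : Int) + (k : Int) + 1)).getD 0])
          simp only [List.sum_append, List.sum_cons, List.sum_nil, add_zero] at H
          rw [show (inicio : Int) + (k : Int) - 1 = (inicio : Int) + (k : Int) + 1 - 1 - 1 by ring] at H
          exact H
        · -- Mateo: inicio += 1
          simp only [if_neg hm]
          rw [seg_tail monedas inicio k]
          have H := ih k (by omega) (i + 2) hi2 (inicio + 1) (by omega)
            (sofia ++ [(PySem.List.pyGet? monedas ((inicio : Int) + (k : Int) + 1)).getD 0])
          simp only [List.sum_append, List.sum_cons, List.sum_nil, add_zero] at H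
          rw [show ((inicio + 1 : Nat) : Int) = (inicio : Int) + 1 by push_cast; ring] at H
          rw [show (inicio : Int) + 1 + (k : Int) - 1 = (inicio : Int) + (k : Int) + 1 - 1 by ring] at H
          exact H

-- ===== VERDICT (by name: the statement is the Claim_ definition above) =====
theorem obtener_ganador_spec : Claim_equal_obtener_ganador := by
  intro monedas _
  unfold Spec_obtener_ganador obtener_ganador obtener_ganador_alt
  have := main_invariant monedas monedas.length 0 rfl 0 (by omega) []
  simpa [List.range_eq_range'] using this
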